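-- pv_equiv track=rewrite | github.com/Shilenkovv/Algorithms_PyGen_bg | 10_Optimization_methods_for_problem_solving/10_3_12.py | min_original_size
-- ===== SOURCE A (Python) =====
-- def min_original_size(num: str) -> str:
--     left, right = 0, len(num) - 1
--     while left <= right:
--         if any(
--             [
--                 num[left] == '0' and num[right] == '1',
--                 num[left] == '1' and num[right] == '0',
--             ]
--         ):
--             left += 1
--             right -= 1
--         else:
--             break
--     return right - left + 1
-- ===== SOURCE B (Python) =====
-- COMP = {'0': '1', '1': '0'}
--
--
-- def _lcp(a: str, b: str) -> int:
--     k = 0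
--     for x, y in zip(a, b):
--         if x != y:
--             break
--         k += 1
--     return k
--
--
-- def min_original_size(num: str) -> int:
--     n = len(num)
--     comp = ''.join(COMP.get(c, '\x00') for c in reversed(num))
--     return n - 2 * _lcp(num[:n // 2], comp)
-- ===== Notes on version B (the rewrite author's own statement) =====
-- stated objective: alternative
-- what changed: B replaces A's in-place two-pointer shrink loop by a reduction to string matching: it builds the complemented reversal of the string once and returns n minus twice the longest common prefix of the first half and that transformed string.
import Mathlib
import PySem

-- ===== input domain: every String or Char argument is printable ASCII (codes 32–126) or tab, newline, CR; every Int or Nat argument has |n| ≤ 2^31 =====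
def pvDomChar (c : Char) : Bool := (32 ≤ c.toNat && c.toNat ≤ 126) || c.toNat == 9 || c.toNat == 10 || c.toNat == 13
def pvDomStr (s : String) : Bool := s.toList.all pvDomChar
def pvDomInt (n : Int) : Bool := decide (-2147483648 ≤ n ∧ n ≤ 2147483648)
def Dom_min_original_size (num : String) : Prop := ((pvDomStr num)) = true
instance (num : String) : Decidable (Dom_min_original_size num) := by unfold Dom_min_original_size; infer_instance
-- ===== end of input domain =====

-- B reduces A's two-pointer shrink loop to a longest-common-prefix against the
-- complemented reversal of the string (objective: alternative, same O(n) cost).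


-- ===== PORT A =====
-- A's while loop: two pointers moving inward while the end characters are complementary.
-- (num[left]/num[right] never go out of range while the loop runs, so the getD default is never used.)
def pvLoopA (cs : List Char) (left right : Int) : Int :=
  if _h : left ≤ right then
    let a := (PySem.List.pyGet? cs left).getD ' '
    let b := (PySem.List.pyGet? cs right).getD ' '
    if (a = '0' ∧ b = '1') ∨ (a = '1' ∧ b = '0') then
      pvLoopA cs (left + 1) (right - 1)
    else
      right - left + 1
  else
    right - left + 1
termination_by (right - left + 1).toNat
decreasing_by omega

def min_original_size (num : String) : Int :=
  pvLoopA num.toList 0 ((num.toList.length : Int) - 1)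

-- ===== PORT B =====
-- Source B module constant COMP = {'0': '1', '1': '0'}
def pvCOMP : PySem.Dict Char Char := PySem.Dict.ofList [('0', '1'), ('1', '0')]

-- Source B helper _lcp: loop over zip(a, b) with a break, accumulator k
def pvLcpGo : List (Char × Char) → Nat → Nat
  | [], k => k
  | (x, y) :: rest, k => if x ≠ y then k else pvLcpGo rest (k + 1)

-- B: n - 2 * lcp(num[:n//2], complemented reversal of num)
def min_original_size_alt (num : String) : Int :=
  let cs := num.toList
  let n := cs.length
  let comp := cs.reverse.map (fun c => PySem.Dict.getD pvCOMP c '\x00')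
  (n : Int) - 2 * (pvLcpGo ((cs.take (n / 2)).zip comp) 0 : Int)

-- ===== PRECONDITION & SPEC =====
def Spec_min_original_size (num : String) (out : Int) : Prop := out = min_original_size_alt num
instance (num : String) (out : Int) : Decidable (Spec_min_original_size num out) := by unfold Spec_min_original_size; infer_instance

-- ===== CLAIM (what is proved, stated in full; the proofs are below) =====
def Claim_equal_min_original_size : Prop := ∀ (num : String), Dom_min_original_size num → Spec_min_original_size num (min_original_size num)

-- ===== LEMMAS AND PROOFS =====

theorem pvCOMP_getD (c d : Char) :
    PySem.Dict.getD pvCOMP c d = if c = '0' then '1' else if c = '1' then '0' else d := by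
  have h : pvCOMP = PySem.Dict.mk [('0', '1'), ('1', '0')] := by decide
  rw [h, PySem.Dict.getD_eq_get?_getD]
  simp only [PySem.Dict.get?_mk_cons, beq_iff_eq]
  by_cases h0 : c = '0' <;> by_cases h1 : c = '1' <;>
    simp [h0, h1, eq_comm, PySem.Dict.get?]

theorem pvPrintableNeNull {c : Char} (h : pvDomChar c = true) : c ≠ '\x00' := by
  intro hc
  subst hc
  simp [pvDomChar] at h

theorem pvLcp_main (cs : List Char) (hdom : cs.all pvDomChar = true) (k l : Nat)
    (hk : cs.length / 2 - l = k) (hl : l ≤ cs.length / 2) :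
    pvLoopA cs (l : Int) ((cs.length : Int) - 1 - l) =
      (cs.length : Int) -
        2 * ((pvLcpGo (((cs.take (cs.length / 2)).zip
              (cs.reverse.map (fun c => PySem.Dict.getD pvCOMP c '\x00'))).drop l) l : Nat) : Int) := by
  have hzlen : ((cs.take (cs.length / 2)).zip
      (cs.reverse.map (fun c => PySem.Dict.getD pvCOMP c '\x00'))).length = cs.length / 2 := by
    simp only [List.length_zip, List.length_take, List.length_map, List.length_reverse]
    omega
  induction k generalizing l with
  | zero =>
    have hl2 : l = cs.length / 2 := by omega
    subst hl2
    rw [List.drop_of_length_le (le_of_eq hzlen), pvLcpGo]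
    rcases Nat.even_or_odd cs.length with he | ho
    · obtain ⟨m, hm⟩ := he
      rw [pvLoopA, dif_neg (by push_cast; omega)]
      push_cast
      omega
    · obtain ⟨m, hm⟩ := ho
      have h2 : cs.length / 2 = m := by omega
      have hml : m < cs.length := by omega
      have hr : (cs.length : Int) - 1 - (cs.length / 2 : Nat) = ((cs.length / 2 : Nat) : Int) := by
        push_cast; omega
      rw [pvLoopA, hr, dif_pos le_rfl]
      simp only [PySem.List.pyGet?_natCast, h2, List.getElem?_eq_getElem hml, Option.getD_some]
      rw [if_neg]
      · omega
      · rintro (⟨h1, h2⟩ | ⟨h1, h2⟩) <;> rw [h1] at h2 <;> exact absurd h2 (by decide)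
  | succ k ih =>
    have hlt : l < cs.length / 2 := by omega
    have hlen : l < cs.length := by omega
    have hrn : cs.length - 1 - l < cs.length := by omega
    have hrl : (l : Int) < (cs.length : Int) - 1 - l := by omega
    have hri : (cs.length : Int) - 1 - l = ((cs.length - 1 - l : Nat) : Int) := by omega
    -- head of the dropped zip list
    have hlz : l < ((cs.take (cs.length / 2)).zip
        (cs.reverse.map (fun c => PySem.Dict.getD pvCOMP c '\x00'))).length := by omega
    have hdrop := List.drop_eq_getElem_cons hlz
    have hzl : ((cs.take (cs.length / 2)).zip
        (cs.reverse.map (fun c => PySem.Dict.getD pvCOMP c '\x00')))[l]'hlz =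
        (cs[l]'hlen, PySem.Dict.getD pvCOMP (cs[cs.length - 1 - l]'hrn) '\x00') := by
      rw [List.getElem_zip]
      congr 1
      · exact List.getElem_take
      · rw [List.getElem_map, List.getElem_reverse]
    have hdomc : pvDomChar (cs[l]'hlen) = true := by
      rw [List.all_eq_true] at hdom
      exact hdom _ (List.getElem_mem hlen)
    have hne0 : cs[l]'hlen ≠ '\x00' := pvPrintableNeNull hdomc
    -- the loop-condition / character-match equivalence
    have hcond : ((cs[l]'hlen = '0' ∧ cs[cs.length - 1 - l]'hrn = '1') ∨
        (cs[l]'hlen = '1' ∧ cs[cs.length - 1 - l]'hrn = '0')) ↔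
        cs[l]'hlen = PySem.Dict.getD pvCOMP (cs[cs.length - 1 - l]'hrn) '\x00' := by
      rw [pvCOMP_getD]
      by_cases hb0 : cs[cs.length - 1 - l]'hrn = '0' <;>
        by_cases hb1 : cs[cs.length - 1 - l]'hrn = '1' <;>
          simp [hb0, hb1, hne0]
    rw [pvLoopA, dif_pos (le_of_lt hrl), hri]
    simp only [PySem.List.pyGet?_natCast, List.getElem?_eq_getElem hlen,
      List.getElem?_eq_getElem hrn, Option.getD_some]
    rw [hdrop, hzl, pvLcpGo]
    by_cases hc : (cs[l]'hlen = '0' ∧ cs[cs.length - 1 - l]'hrn = '1') ∨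
        (cs[l]'hlen = '1' ∧ cs[cs.length - 1 - l]'hrn = '0')
    · -- complementary pair: both sides recurse
      have heq : cs[l]'hlen = PySem.Dict.getD pvCOMP (cs[cs.length - 1 - l]'hrn) '\x00' :=
        hcond.mp hc
      rw [if_pos hc, if_neg (by simpa using heq)]
      have hl1 : ((l : Int) + 1) = ((l + 1 : Nat) : Int) := by push_cast; ring
      have hr1 : ((cs.length - 1 - l : Nat) : Int) - 1 = (cs.length : Int) - 1 - (l + 1 : Nat) := by
        push_cast; omega
      rw [hl1, hr1, ih (l + 1) (by omega) (by omega)]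
    · -- mismatch: A breaks, the lcp loop stops at l
      have hne : cs[l]'hlen ≠ PySem.Dict.getD pvCOMP (cs[cs.length - 1 - l]'hrn) '\x00' :=
        fun h => hc (hcond.mpr h)
      rw [if_neg hc, if_pos (by simpa using hne)]
      omega
-- ===== VERDICT (by name: the statement is the Claim_ definition above) =====
theorem min_original_size_spec : Claim_equal_min_original_size := by
  intro num hdom
  unfold Spec_min_original_size min_original_size min_original_size_alt
  have h := pvLcp_main num.toList (by simpa [pvDomStr, Dom_min_original_size] using hdom)
      (num.toList.length / 2) 0 rfl (Nat.zero_le _)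
  simpa using h
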